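-- pv_equiv track=rewrite | github.com/SimonCoulombe/SimonBot | opponent_bots/agent_smith/offsets.py | calculate_d
-- ===== SOURCE A (Python) =====
-- import math
--
-- def calculate_d( radius2 ):
-- 	'j.w., tyle ze dict (offset) => distance'
--
-- 	offsets = {}
-- 	mx = int( math.sqrt( radius2 ))
-- 	for d_row in range( -mx, mx + 1 ):
-- 		for d_col in range( -mx, mx + 1 ):
-- 			d2 = d_row ** 2 + d_col ** 2
-- 			#print d_row, d_col
-- 			if d2 <= radius2:
-- 				offsets[( d_row, d_col )] = round( math.sqrt( d2 ))
-- 	return offsets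
-- ===== SOURCE B (Python) =====
-- import math
--
-- def _row_pairs(radius2, row):
--     # one row of the first quadrant: pairs (col, nearest-integer distance) for col = 0..mc,
--     # then mirrored to cols -mc..-1; the rounded distance r is advanced incrementally
--     # (r is the least r >= 0 with d2 <= r*r + r, i.e. round(sqrt(d2)); d2 grows with col)
--     rr = row * row
--     mc = math.isqrt(radius2 - rr)
--     right = []
--     r = row
--     for col in range(mc + 1):
--         d2 = rr + col * col
--         while d2 > r * r + r:
--             r += 1
--         right.append((col, r))
--     left = [(-col, v) for (col, v) in reversed(right[1:])]
--     return left + right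
--
-- def calculate_d(radius2):
--     'j.w., tyle ze dict (offset) => distance'
--     mx = math.isqrt(radius2)
--     rows = [_row_pairs(radius2, row) for row in range(mx + 1)]
--     offsets = {}
--     for row in range(-mx, mx + 1):
--         for col, v in rows[abs(row)]:
--             offsets[(row, col)] = v
--     return offsets
-- ===== Notes on version B (the rewrite author's own statement) =====
-- stated objective: alternative
-- what changed: B exploits the disk's symmetry: it computes each first-quadrant row once (cols 0..mc, with the rounded distance advanced incrementally by an all-integer threshold test instead of a float sqrt per cell), mirrors it to negative columns, and reuses the same precomputed row for row and -row, instead of A's scan of every cell of the bounding square with a per-cell membership test and float sqrt.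
import Mathlib
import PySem

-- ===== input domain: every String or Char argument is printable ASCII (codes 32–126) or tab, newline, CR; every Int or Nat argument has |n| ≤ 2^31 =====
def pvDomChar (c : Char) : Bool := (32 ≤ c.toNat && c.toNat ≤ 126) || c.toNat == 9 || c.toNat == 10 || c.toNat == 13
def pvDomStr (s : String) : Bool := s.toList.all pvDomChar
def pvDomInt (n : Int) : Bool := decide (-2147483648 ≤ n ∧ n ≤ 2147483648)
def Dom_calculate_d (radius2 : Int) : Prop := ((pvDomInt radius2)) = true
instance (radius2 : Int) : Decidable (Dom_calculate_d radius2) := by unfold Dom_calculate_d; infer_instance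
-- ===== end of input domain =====

-- B replaces A's scan of every cell of the bounding square (membership test + float sqrt per
-- cell) by symmetry: each first-quadrant row is computed once with an incrementally advanced
-- integer rounded distance, mirrored to negative columns, and reused for row and -row.

-- ===== PORT A =====
-- float notes (exact on Dom ∧ Pre_, i.e. 0 ≤ radius2 ≤ 2^31):
--  * int(math.sqrt(radius2)) = Int.sqrt radius2: math.sqrt is correctly rounded, and for
--    0 ≤ n ≤ 2^31 its error is far too small to cross an integer, so truncation = isqrt;
--  * round(math.sqrt(d2)) = (Int.sqrt (4*d2) + 1) / 2 = the nearest integer to √d2: for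
--    integer d2, √d2 is never within a float-ulp of a half-integer ((m+1/2)² is not an
--    integer), so there is no tie and no misrounding.
def calculate_d (radius2 : Int) : List (Int × Int × Int) :=
  let mx : Int := Int.sqrt radius2
  let offsets : PySem.Dict (Int × Int) Int :=
    (PySem.List.pyRange (-mx) (mx + 1) 1).foldl (fun d d_row =>
      (PySem.List.pyRange (-mx) (mx + 1) 1).foldl (fun d d_col =>
        let d2 := d_row ^ 2 + d_col ^ 2
        if d2 ≤ radius2 then
          d.insert (d_row, d_col) ((Int.sqrt (4 * d2) + 1) / 2)
        else d) d) PySem.Dict.empty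
  offsets.items.map (fun p => (p.1.1, p.1.2, p.2))

-- ===== PORT B =====
-- _round_dist's while loop: advance r until d2 <= r*r + r
def pvAdvance (d2 r : Int) : Int :=
  if d2 ≤ r * r + r then r else pvAdvance d2 (r + 1)
termination_by (d2 - r).toNat
decreasing_by
  have h1 : 0 ≤ r * r := mul_self_nonneg r
  omega

-- _row_pairs: cols 0..mc with the carried rounded distance, then the mirrored left half
-- (math.isqrt n = Int.sqrt n, exact; Source B raises on negative input, excluded by Pre_)
def pvRowPairs (radius2 row : Int) : List (Int × Int) :=
  let rr := row * row
  let mc : Int := Int.sqrt (radius2 - rr)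
  let right : List (Int × Int) :=
    ((PySem.List.pyRange 0 (mc + 1) 1).foldl (fun s col =>
      let d2 := rr + col * col
      let r := pvAdvance d2 s.1
      (r, s.2 ++ [(col, r)])) (row, ([] : List (Int × Int)))).2
  let left := ((PySem.List.slice right (some 1) none).reverse).map (fun cv => (-cv.1, cv.2))
  left ++ right

def calculate_d_alt (radius2 : Int) : List (Int × Int × Int) :=
  let mx : Int := Int.sqrt radius2
  let rows : List (List (Int × Int)) :=
    (PySem.List.pyRange 0 (mx + 1) 1).map (fun row => pvRowPairs radius2 row)
  let offsets : PySem.Dict (Int × Int) Int :=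
    (PySem.List.pyRange (-mx) (mx + 1) 1).foldl (fun d row =>
      (PySem.List.pyGetD rows |row| []).foldl (fun d cv =>
        d.insert (row, cv.1) cv.2) d) PySem.Dict.empty
  offsets.items.map (fun p => (p.1.1, p.1.2, p.2))

-- ===== PRECONDITION & SPEC =====
-- Pre_ excludes negative radius2, on which A raises ValueError (math.sqrt of a negative).
def Pre_calculate_d (radius2 : Int) : Prop := 0 ≤ radius2
instance (radius2 : Int) : Decidable (Pre_calculate_d radius2) := by unfold Pre_calculate_d; infer_instance
def pvWitness_calculate_d : Int := 5

def Spec_calculate_d (radius2 : Int) (out : List (Int × Int × Int)) : Prop := out = calculate_d_alt radius2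
instance (radius2 : Int) (out : List (Int × Int × Int)) : Decidable (Spec_calculate_d radius2 out) := by unfold Spec_calculate_d; infer_instance

-- ===== CLAIM (what is proved, stated in full; the proofs are below) =====
def Claim_equal_calculate_d : Prop := ∀ (radius2 : Int), Dom_calculate_d radius2 → Pre_calculate_d radius2 → Spec_calculate_d radius2 (calculate_d radius2)

-- ===== LEMMAS AND PROOFS =====

-- the nearest integer to √d2, as A computes it
def pvRd (d2 : Int) : Int := (Int.sqrt (4 * d2) + 1) / 2

-- c² ≤ rem  ↔  -√rem ≤ c ≤ √rem   (integer square root, 0 ≤ rem)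
theorem sq_le_iff_abs_le_sqrt (rem c : Int) (h : 0 ≤ rem) :
    c * c ≤ rem ↔ -Int.sqrt rem ≤ c ∧ c ≤ Int.sqrt rem := by
  have h1 : c * c = ((c.natAbs * c.natAbs : Nat) : Int) := (Int.natAbs_mul_self).symm
  have h2 : ((c.natAbs * c.natAbs : Nat) : Int) ≤ rem ↔ c.natAbs * c.natAbs ≤ rem.toNat := by
    omega
  have h3 : c.natAbs * c.natAbs ≤ rem.toNat ↔ c.natAbs ≤ Nat.sqrt rem.toNat :=
    Nat.le_sqrt.symm
  have h4 : Int.sqrt rem = ((Nat.sqrt rem.toNat : Nat) : Int) := rfl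
  rw [h1, h2, h3, h4]
  omega

-- monotonicity of Int.sqrt on our inputs
theorem int_sqrt_le_sqrt {m n : Int} (h : m ≤ n) : Int.sqrt m ≤ Int.sqrt n := by
  have h1 : Nat.sqrt m.toNat ≤ Nat.sqrt n.toNat := Nat.sqrt_le_sqrt (by omega)
  have h4m : Int.sqrt m = ((Nat.sqrt m.toNat : Nat) : Int) := rfl
  have h4n : Int.sqrt n = ((Nat.sqrt n.toNat : Nat) : Int) := rfl
  rw [h4m, h4n]
  exact_mod_cast h1

-- the square root's defining bound, in Int
theorem int_sqrt_sq_le (n : Int) (h : 0 ≤ n) : Int.sqrt n * Int.sqrt n ≤ n := by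
  have h6 : Nat.sqrt n.toNat * Nat.sqrt n.toNat ≤ n.toNat := by
    nlinarith [Nat.sqrt_le' n.toNat]
  have h4 : Int.sqrt n = ((Nat.sqrt n.toNat : Nat) : Int) := rfl
  rw [h4, ← Int.toNat_of_nonneg h]
  exact_mod_cast h6

-- pvRd is the least r ≥ 0 with d2 ≤ r² + r
theorem rd_le_iff (d2 r : Int) (hd : 0 ≤ d2) (hr : 0 ≤ r) :
    d2 ≤ r * r + r ↔ pvRd d2 ≤ r := by
  have h4 : 0 ≤ 4 * d2 := by omega
  have hiff := sq_le_iff_abs_le_sqrt (4 * d2) (2 * r + 1) h4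
  have hs0 : 0 ≤ Int.sqrt (4 * d2) := Int.sqrt_nonneg _
  have hexp : (2 * r + 1) * (2 * r + 1) = 4 * (r * r + r) + 1 := by ring
  unfold pvRd
  constructor
  · intro h
    have hnot : ¬ (2 * r + 1) * (2 * r + 1) ≤ 4 * d2 := by omega
    have : ¬ (2 * r + 1 ≤ Int.sqrt (4 * d2)) := fun hc => hnot (hiff.mpr ⟨by omega, hc⟩)
    omega
  · intro h
    have hle : ¬ (2 * r + 1 ≤ Int.sqrt (4 * d2)) := by omega
    have hnot : ¬ (2 * r + 1) * (2 * r + 1) ≤ 4 * d2 := fun hc => hle (hiff.mp hc).2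
    omega

theorem rd_nonneg (d2 : Int) : 0 ≤ pvRd d2 := by
  have := Int.sqrt_nonneg (4 * d2)
  unfold pvRd
  omega

theorem rd_mono {d2 e2 : Int} (h : d2 ≤ e2) : pvRd d2 ≤ pvRd e2 := by
  have := int_sqrt_le_sqrt (show 4 * d2 ≤ 4 * e2 by omega)
  unfold pvRd
  omega

-- the while loop lands exactly on pvRd when started at or below it
theorem advance_eq_aux (d2 : Int) (hd : 0 ≤ d2) : ∀ (k : Nat) (r : Int), 0 ≤ r →
    r ≤ pvRd d2 → (pvRd d2 - r).toNat ≤ k → pvAdvance d2 r = pvRd d2 := by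
  intro k
  induction k with
  | zero =>
    intro r hr hle hk
    have heq : r = pvRd d2 := by omega
    have hc := (rd_le_iff d2 r hd hr).mpr (by omega)
    rw [pvAdvance, if_pos hc]
    exact heq
  | succ k ih =>
    intro r hr hle hk
    by_cases hc : d2 ≤ r * r + r
    · rw [pvAdvance, if_pos hc]
      have := (rd_le_iff d2 r hd hr).mp hc
      omega
    · rw [pvAdvance, if_neg hc]
      have hlt : ¬ pvRd d2 ≤ r := fun h => hc ((rd_le_iff d2 r hd hr).mpr h)
      exact ih (r + 1) (by omega) (by omega) (by omega)

theorem advance_eq (d2 r : Int) (hd : 0 ≤ d2) (hr : 0 ≤ r) (hle : r ≤ pvRd d2) :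
    pvAdvance d2 r = pvRd d2 :=
  advance_eq_aux d2 hd (pvRd d2 - r).toNat r hr hle le_rfl

-- the carried-r fold over cols a..b-1 produces exactly the nearest-integer distances
theorem rowfold (rr : Int) (hrr : 0 ≤ rr) : ∀ (k : Nat) (a b : Int), (b - a).toNat ≤ k →
    0 ≤ a → ∀ (r0 : Int), 0 ≤ r0 → r0 ≤ pvRd (rr + a * a) → ∀ (acc : List (Int × Int)),
    ((PySem.List.pyRange a b 1).foldl (fun s col =>
      (pvAdvance (rr + col * col) s.1, s.2 ++ [(col, pvAdvance (rr + col * col) s.1)]))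
      (r0, acc)).2
      = acc ++ (PySem.List.pyRange a b 1).map (fun c => (c, pvRd (rr + c * c))) := by
  intro k
  induction k with
  | zero =>
    intro a b hk _ r0 _ _ acc
    rw [PySem.List.pyRange_one_eq_nil (by omega)]
    simp
  | succ k ih =>
    intro a b hk ha r0 hr0 hle acc
    by_cases hab : b ≤ a
    · rw [PySem.List.pyRange_one_eq_nil hab]
      simp
    · rw [PySem.List.pyRange_one_cons (by omega)]
      simp only [List.foldl_cons, List.map_cons]
      have hadv : pvAdvance (rr + a * a) r0 = pvRd (rr + a * a) :=
        advance_eq _ _ (by nlinarith) hr0 hle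
      rw [hadv]
      rw [ih (a + 1) b (by omega) (by omega) (pvRd (rr + a * a)) (rd_nonneg _)
        (rd_mono (by nlinarith)) (acc ++ [(a, pvRd (rr + a * a))])]
      simp

-- the assembled row equals the direct enumeration of cols -mc..mc
theorem rowPairs_eq (radius2 row : Int) (hrow : 0 ≤ row) :
    pvRowPairs radius2 row =
      (PySem.List.pyRange (-(Int.sqrt (radius2 - row * row)))
        (Int.sqrt (radius2 - row * row) + 1) 1).map
        (fun c => (c, pvRd (row * row + c * c))) := by
  unfold pvRowPairs
  simp only []
  set rr := row * row with hrr
  set mc := Int.sqrt (radius2 - rr) with hmc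
  have hmc0 : 0 ≤ mc := Int.sqrt_nonneg _
  have hrr0 : 0 ≤ rr := mul_self_nonneg row
  -- the starting r is at or below the first rounded distance
  have hself : row ≤ pvRd (rr + 0 * 0) := by
    by_contra hcon
    have h4 : 0 ≤ pvRd (rr + 0 * 0) := rd_nonneg _
    have h1 : pvRd (rr + 0 * 0) ≤ row - 1 := by omega
    have h2 := (rd_le_iff (rr + 0 * 0) (row - 1) (by omega) (by omega)).mpr h1
    rw [hrr] at h2
    have h3 : (row - 1) * (row - 1) + (row - 1) = row * row - row := by ring
    have h5 : (0 : Int) * 0 = 0 := by ring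
    linarith
  -- the right half is a map
  have hright := rowfold rr hrr0 (mc + 1 - 0).toNat 0 (mc + 1) le_rfl le_rfl row hrow hself []
  rw [hright]
  simp only [List.nil_append]
  -- the left half mirrors the right half's tail
  rw [PySem.List.slice_from_one]
  have htail : ((PySem.List.pyRange 0 (mc + 1) 1).map
      (fun c => (c, pvRd (rr + c * c)))).tail
      = (PySem.List.pyRange 1 (mc + 1) 1).map (fun c => (c, pvRd (rr + c * c))) := by
    rw [PySem.List.pyRange_one_cons (by omega : (0:Int) < mc + 1)]
    simp
  rw [htail]
  -- split the target range at 0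
  rw [PySem.List.pyRange_one_append (-mc) 0 (mc + 1) (by omega) (by omega), List.map_append]
  congr 1
  -- -mc..-1 is the reversed, negated 1..mc
  rw [← List.map_reverse]
  have hrev : PySem.List.pyRange mc 0 (-1) = (PySem.List.pyRange 1 (mc + 1) 1).reverse := by
    simpa using PySem.List.pyRange_neg_one_eq_reverse mc 0
  rw [← hrev]
  rw [PySem.List.pyRange_neg_one, PySem.List.pyRange_one]
  simp only [List.map_map]
  have hlen : ((0:Int) - -mc).toNat = (mc - 0).toNat := by omega
  rw [hlen]
  apply List.map_congr_left
  intro j _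
  simp only [Function.comp]
  have h1 : -mc + (j : Int) = -(mc - j) := by ring
  have h2 : (-mc + (j : Int)) * (-mc + (j : Int)) = (mc - j) * (mc - j) := by ring
  rw [h1, neg_mul_neg]

-- A's membership-filtered row equals the directly enumerated row
theorem filter_pyRange_sq (radius2 r2 mx : Int) (h0 : 0 ≤ radius2 - r2)
    (hmx : Int.sqrt (radius2 - r2) ≤ mx) :
    (PySem.List.pyRange (-mx) (mx + 1) 1).filter (fun c => decide (r2 + c * c ≤ radius2)) =
      PySem.List.pyRange (-(Int.sqrt (radius2 - r2))) (Int.sqrt (radius2 - r2) + 1) 1 := by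
  have hs0 : 0 ≤ Int.sqrt (radius2 - r2) := Int.sqrt_nonneg _
  set mc := Int.sqrt (radius2 - r2) with hmc
  have hsplit1 : PySem.List.pyRange (-mx) (mx + 1) 1 =
      PySem.List.pyRange (-mx) (-mc) 1 ++ PySem.List.pyRange (-mc) (mx + 1) 1 :=
    PySem.List.pyRange_one_append _ _ _ (by omega) (by omega)
  have hsplit2 : PySem.List.pyRange (-mc) (mx + 1) 1 =
      PySem.List.pyRange (-mc) (mc + 1) 1 ++ PySem.List.pyRange (mc + 1) (mx + 1) 1 :=
    PySem.List.pyRange_one_append _ _ _ (by omega) (by omega)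
  rw [hsplit1, hsplit2, List.filter_append, List.filter_append]
  have hiff : ∀ c : Int, (r2 + c * c ≤ radius2) ↔ (-mc ≤ c ∧ c ≤ mc) := by
    intro c
    have hkey := sq_le_iff_abs_le_sqrt (radius2 - r2) c h0
    rw [← hmc] at hkey
    rw [← hkey]
    constructor <;> intro hx <;> linarith
  have hleft : (PySem.List.pyRange (-mx) (-mc) 1).filter
      (fun c => decide (r2 + c * c ≤ radius2)) = [] := by
    apply List.filter_eq_nil_iff.mpr
    intro c hc
    have hb := PySem.List.mem_pyRange_one.mp hc
    simp only [decide_eq_true_eq, hiff c]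
    omega
  have hright : (PySem.List.pyRange (mc + 1) (mx + 1) 1).filter
      (fun c => decide (r2 + c * c ≤ radius2)) = [] := by
    apply List.filter_eq_nil_iff.mpr
    intro c hc
    have hb := PySem.List.mem_pyRange_one.mp hc
    simp only [decide_eq_true_eq, hiff c]
    omega
  have hmid : (PySem.List.pyRange (-mc) (mc + 1) 1).filter
      (fun c => decide (r2 + c * c ≤ radius2)) = PySem.List.pyRange (-mc) (mc + 1) 1 := by
    apply List.filter_eq_self.mpr
    intro c hc
    have hb := PySem.List.mem_pyRange_one.mp hc
    exact decide_eq_true ((hiff c).mpr (by omega))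
  rw [hleft, hmid, hright, List.nil_append, List.append_nil]

theorem calculate_d_spec : Claim_equal_calculate_d := by
  intro radius2 _ hpre
  unfold Spec_calculate_d calculate_d calculate_d_alt
  simp only []
  congr 1
  apply congrArg
  apply PySem.List.foldl_congr_mem
  intro d d_row hrow
  have hrowb := PySem.List.mem_pyRange_one.mp hrow
  have hmxsq : Int.sqrt radius2 * Int.sqrt radius2 ≤ radius2 := int_sqrt_sq_le _ hpre
  have hr2 : d_row * d_row ≤ radius2 := by nlinarith [Int.sqrt_nonneg radius2]
  have h0 : 0 ≤ radius2 - d_row * d_row := by omega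
  have hmx : Int.sqrt (radius2 - d_row * d_row) ≤ Int.sqrt radius2 :=
    int_sqrt_le_sqrt (by have := mul_self_nonneg d_row; omega)
  have hpow : ∀ c : Int, d_row ^ 2 + c ^ 2 = d_row * d_row + c * c := by
    intro c; ring
  have habs : |d_row| * |d_row| = d_row * d_row := abs_mul_abs_self d_row
  have habs_lt : |d_row| < Int.sqrt radius2 + 1 := by
    rcases abs_cases d_row with ⟨he, _⟩ | ⟨he, _⟩ <;> omega
  -- B's inner loop: fetch the precomputed row and fold its inserts
  have hB : (PySem.List.pyGetD ((PySem.List.pyRange 0 (Int.sqrt radius2 + 1) 1).map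
        (fun row => pvRowPairs radius2 row)) |d_row| []).foldl
        (fun d cv => d.insert (d_row, cv.1) cv.2) d
      = (PySem.List.pyRange (-(Int.sqrt (radius2 - d_row * d_row)))
          (Int.sqrt (radius2 - d_row * d_row) + 1) 1).foldl
        (fun d d_col =>
          d.insert (d_row, d_col) ((Int.sqrt (4 * (d_row * d_row + d_col * d_col)) + 1) / 2)) d := by
    rw [PySem.List.pyGetD_map_pyRange_of_nonneg _ _ _ _ (abs_nonneg d_row) habs_lt]
    rw [rowPairs_eq radius2 |d_row| (abs_nonneg d_row)]
    rw [habs, List.foldl_map]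
    rfl
  calc (PySem.List.pyRange (-(Int.sqrt radius2)) (Int.sqrt radius2 + 1) 1).foldl
        (fun d d_col =>
          if d_row ^ 2 + d_col ^ 2 ≤ radius2 then
            d.insert (d_row, d_col) ((Int.sqrt (4 * (d_row ^ 2 + d_col ^ 2)) + 1) / 2)
          else d) d
      = (PySem.List.pyRange (-(Int.sqrt radius2)) (Int.sqrt radius2 + 1) 1).foldl
        (fun d d_col =>
          if d_row * d_row + d_col * d_col ≤ radius2 then
            d.insert (d_row, d_col) ((Int.sqrt (4 * (d_row * d_row + d_col * d_col)) + 1) / 2)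
          else d) d := by
        apply PySem.List.foldl_congr_mem
        intro acc c _
        simp only [hpow c]
    _ = ((PySem.List.pyRange (-(Int.sqrt radius2)) (Int.sqrt radius2 + 1) 1).filter
          (fun c => decide (d_row * d_row + c * c ≤ radius2))).foldl
        (fun d d_col =>
          d.insert (d_row, d_col) ((Int.sqrt (4 * (d_row * d_row + d_col * d_col)) + 1) / 2)) d :=
        PySem.List.foldl_ite_eq_foldl_filter _ _ _ _
    _ = (PySem.List.pyRange (-(Int.sqrt (radius2 - d_row * d_row)))
          (Int.sqrt (radius2 - d_row * d_row) + 1) 1).foldl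
        (fun d d_col =>
          d.insert (d_row, d_col) ((Int.sqrt (4 * (d_row * d_row + d_col * d_col)) + 1) / 2)) d := by
        rw [filter_pyRange_sq radius2 (d_row * d_row) (Int.sqrt radius2) h0 hmx]
    _ = (PySem.List.pyGetD ((PySem.List.pyRange 0 (Int.sqrt radius2 + 1) 1).map
          (fun row => pvRowPairs radius2 row)) |d_row| []).foldl
        (fun d cv => d.insert (d_row, cv.1) cv.2) d := hB.symm
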